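-- pv_equiv track=rewrite | github.com/Jesiel-dev-creator/Arkhos | backend/arkhos/iterate.py | _get_relevant_files
-- ===== SOURCE A (Python) =====
-- def _get_relevant_files(
--     change_request: str, all_files: dict[str, str]
-- ) -> dict[str, str]:
--     """Return only files relevant to the change request.
--
--     Always includes: ARKHOS.md, tailwind.config.ts, src/index.css
--     Keyword-based: if "hero" in request → include Hero.tsx
--     """
--     always_include = {"ARKHOS.md", "tailwind.config.ts", "src/index.css"}
--     relevant: dict[str, str] = {
--         k: v for k, v in all_files.items() if k in always_include
--     }
--
--     req_lower = change_request.lower()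
--
--     # Match section names mentioned in the request
--     for path, content in all_files.items():
--         if not path.startswith("src/sections/"):
--             continue
--         section_name = (
--             path.split("/")[-1].replace(".tsx", "").lower()
--         )
--         if section_name in req_lower:
--             relevant[path] = content
--
--     # Global style changes → include all sections
--     global_keywords = [
--         "color", "font", "style", "dark", "light", "theme",
--         "all", "every", "entire", "whole",
--     ]
--     if any(kw in req_lower for kw in global_keywords):
--         relevant.update({
--             k: v
--             for k, v in all_files.items()
--             if k.startswith("src/sections/")
--         })
--
--     # If nothing matched, include all sections (broad change)
--     section_count = sum(
--         1 for k in relevant if k.startswith("src/sections/")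
--     )
--     if section_count == 0:
--         relevant.update({
--             k: v
--             for k, v in all_files.items()
--             if k.startswith("src/sections/")
--         })
--
--     return relevant
-- ===== SOURCE B (Python) =====
-- def _get_relevant_files(
--     change_request: str, all_files: dict[str, str]
-- ) -> dict[str, str]:
--     """Return only files relevant to the change request.
--
--     Always includes: ARKHOS.md, tailwind.config.ts, src/index.css
--     Keyword-based: if "hero" in request → include Hero.tsx
--     """
--     req_lower = change_request.lower()
--
--     def rank(path: str) -> int:
--         # 0 = always included, 1 = section named in the request,
--         # 2 = other section file, 3 = irrelevant file
--         if path in ("ARKHOS.md", "tailwind.config.ts", "src/index.css"):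
--             return 0
--         if not path.startswith("src/sections/"):
--             return 3
--         name = path.split("/")[-1].replace(".tsx", "").lower()
--         return 1 if name in req_lower else 2
--
--     decorated = [(rank(k), k, v) for k, v in all_files.items()]
--     wide = not any(r == 1 for r, _, _ in decorated) or any(
--         kw in req_lower
--         for kw in ("color", "font", "style", "dark", "light", "theme",
--                    "all", "every", "entire", "whole")
--     )
--     cutoff = 3 if wide else 2
--     decorated.sort(key=lambda t: t[0])  # stable: keeps all_files order per rank
--     return {k: v for r, k, v in decorated if r < cutoff}
-- ===== Notes on version B (the rewrite author's own statement) =====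
-- stated objective: alternative
-- what changed: Replaced A's dict mutate-and-backfill (seed, in-place inserts, two conditional dict.update back-fills guarded by a recount) by a decorate/stable-sort/threshold scheme: assign each file one relevance rank (0 always, 1 section named in the request, 2 other section, 3 irrelevant), stable-sort by rank, and keep everything below a single cutoff derived from the global-keyword / nothing-matched test.
import Mathlib
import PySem

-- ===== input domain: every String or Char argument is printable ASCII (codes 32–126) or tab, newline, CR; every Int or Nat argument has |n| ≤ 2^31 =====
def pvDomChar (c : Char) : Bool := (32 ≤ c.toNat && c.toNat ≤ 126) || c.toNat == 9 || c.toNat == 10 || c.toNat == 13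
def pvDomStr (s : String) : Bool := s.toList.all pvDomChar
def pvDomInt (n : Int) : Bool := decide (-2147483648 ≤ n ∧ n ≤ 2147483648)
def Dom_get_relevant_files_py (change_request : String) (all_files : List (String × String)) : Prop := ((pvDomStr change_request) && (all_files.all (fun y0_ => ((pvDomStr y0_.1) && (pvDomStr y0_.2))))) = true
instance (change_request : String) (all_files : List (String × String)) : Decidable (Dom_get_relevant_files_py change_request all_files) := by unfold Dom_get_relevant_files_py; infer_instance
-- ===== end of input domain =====

-- B replaces A's dict mutate-and-backfill by a decorate/stable-sort/threshold scheme (rank each file 0–3,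
-- stable-sort by rank, keep everything below one cutoff); same return value, no speed claim.
-- Both ports first normalise the dict-typed argument with PySem.Dict.ofList (Python's call boundary: a dict has unique keys, last value wins).

-- ===== PORT A =====
-- path.split("/")[-1].replace(".tsx", "").lower()  — split? "/" is never none (sep ≠ ""), split never returns [], so the two getD defaults are never used
def pvSectionName (path : String) : String :=
  PySem.Str.lower (PySem.Str.replace ((PySem.List.pyGet? ((PySem.Str.split? path "/").getD []) (-1)).getD "") ".tsx" "")

def pvAlwaysInclude : PySem.Set String := PySem.Set.ofList ["ARKHOS.md", "tailwind.config.ts", "src/index.css"]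

def pvGlobalKeywords : List String :=
  ["color", "font", "style", "dark", "light", "theme", "all", "every", "entire", "whole"]

def get_relevant_files_py (change_request : String) (all_files : List (String × String)) : List (String × String) :=
  let all_files := (PySem.Dict.ofList all_files).items
  let relevant : PySem.Dict String String :=
    all_files.foldl (fun d kv => if PySem.Set.contains pvAlwaysInclude kv.1 then d.insert kv.1 kv.2 else d) PySem.Dict.empty
  let req_lower := PySem.Str.lower change_request
  let relevant :=
    all_files.foldl (fun rel kv =>
      if !(PySem.Str.startswith kv.1 "src/sections/") then rel
      else
        let section_name := pvSectionName kv.1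
        if PySem.Str.isIn section_name req_lower then rel.insert kv.1 kv.2 else rel) relevant
  let relevant :=
    if pvGlobalKeywords.any (fun kw => PySem.Str.isIn kw req_lower) then
      relevant.update (all_files.filter (fun kv => PySem.Str.startswith kv.1 "src/sections/"))
    else relevant
  let section_count :=
    relevant.keys.foldl (fun n k => if PySem.Str.startswith k "src/sections/" then n + 1 else n) (0 : Int)
  let relevant :=
    if section_count == 0 then
      relevant.update (all_files.filter (fun kv => PySem.Str.startswith kv.1 "src/sections/"))
    else relevant
  relevant.items

-- ===== PORT B =====
-- rank(path): 0 = always included, 1 = section named in the request, 2 = other section file, 3 = irrelevant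
def pvRank (req_lower : String) (path : String) : Int :=
  if (["ARKHOS.md", "tailwind.config.ts", "src/index.css"] : List String).contains path then 0
  else if !(PySem.Str.startswith path "src/sections/") then 3
  else if PySem.Str.isIn (pvSectionName path) req_lower then 1 else 2

def get_relevant_files_py_alt (change_request : String) (all_files : List (String × String)) : List (String × String) :=
  let all_files := (PySem.Dict.ofList all_files).items
  let req_lower := PySem.Str.lower change_request
  let decorated := all_files.map (fun kv => (pvRank req_lower kv.1, kv.1, kv.2))
  let wide := !(decorated.any (fun t => t.1 == 1)) ||
    (["color", "font", "style", "dark", "light", "theme", "all", "every", "entire", "whole"] : List String).any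
      (fun kw => PySem.Str.isIn kw req_lower)
  let cutoff : Int := if wide then 3 else 2
  let decorated := PySem.List.sorted decorated (fun t => t.1)   -- decorated.sort(key=lambda t: t[0]), stable
  (decorated.filter (fun t => t.1 < cutoff)).map (fun t => (t.2.1, t.2.2))

-- ===== PRECONDITION & SPEC =====
def Spec_get_relevant_files_py (change_request : String) (all_files : List (String × String)) (out : List (String × String)) : Prop := out = get_relevant_files_py_alt change_request all_files
instance (change_request : String) (all_files : List (String × String)) (out : List (String × String)) : Decidable (Spec_get_relevant_files_py change_request all_files out) := by unfold Spec_get_relevant_files_py; infer_instance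

-- ===== CLAIM (what is proved, stated in full; the proofs are below) =====
def Claim_equal_get_relevant_files_py : Prop := ∀ (change_request : String) (all_files : List (String × String)), Dom_get_relevant_files_py change_request all_files → Spec_get_relevant_files_py change_request all_files (get_relevant_files_py change_request all_files)

-- ===== LEMMAS AND PROOFS =====

-- abbreviations used only by the proofs
def pvP (k : String) : Bool := PySem.Str.startswith k "src/sections/"
def pvM (req : String) (kv : String × String) : Bool := pvP kv.1 && PySem.Str.isIn (pvSectionName kv.1) req
def pvAI (k : String) : Bool := PySem.Set.contains pvAlwaysInclude k

lemma pvAI_not_P {k : String} (h : pvAI k = true) : pvP k = false := by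
  have hm : k = "ARKHOS.md" ∨ k = "tailwind.config.ts" ∨ k = "src/index.css" := by
    simpa [pvAI, pvAlwaysInclude, PySem.Set.contains, PySem.Set.ofList] using h
  rcases hm with rfl | rfl | rfl <;> decide

-- the tuple-membership test of B's rank function is the set-membership test of A
lemma pv_contains_eq_AI (k : String) :
    (["ARKHOS.md", "tailwind.config.ts", "src/index.css"] : List String).contains k = pvAI k := by
  have h1 : (["ARKHOS.md", "tailwind.config.ts", "src/index.css"] : List String).contains k = true
      ↔ (k = "ARKHOS.md" ∨ k = "tailwind.config.ts" ∨ k = "src/index.css") := by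
    simp only [List.contains_eq_mem, decide_eq_true_eq, List.mem_cons, List.not_mem_nil, or_false]
  have h2 : pvAI k = true ↔ (k = "ARKHOS.md" ∨ k = "tailwind.config.ts" ∨ k = "src/index.css") := by
    simp [pvAI, pvAlwaysInclude, PySem.Set.contains, PySem.Set.ofList]
  exact Bool.eq_iff_iff.mpr (by simpa using h1.trans h2.symm)

-- rank in terms of the proof predicates
lemma pvRank_eq (req k : String) :
    pvRank req k = if pvAI k then 0 else if !(pvP k) then 3
      else if PySem.Str.isIn (pvSectionName k) req then 1 else 2 := by
  rw [pvRank, pv_contains_eq_AI]; rfl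

-- a pair of an assoc list with Nodup keys is determined by its key
lemma pv_pair_eq_of_nodup {L : List (String × String)} (hnd : (L.map Prod.fst).Nodup)
    {a b : String × String} (ha : a ∈ L) (hb : b ∈ L) (hk : a.1 = b.1) : a = b := by
  induction L with
  | nil => cases ha
  | cons x t ih =>
    simp only [List.map_cons, List.nodup_cons] at hnd
    rcases List.mem_cons.mp ha with rfl | ha' <;> rcases List.mem_cons.mp hb with rfl | hb'
    · rfl
    · exact absurd (show a.1 ∈ t.map Prod.fst by rw [hk]; exact List.mem_map_of_mem hb') hnd.1
    · exact absurd (show b.1 ∈ t.map Prod.fst by rw [← hk]; exact List.mem_map_of_mem ha') hnd.1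
    · exact ih hnd.2 ha' hb'

-- d.insert k v = d when d already maps k to v (Nodup keys)
lemma pv_insert_self {d : PySem.Dict String String} {k : String} {v : String}
    (hnd : d.keys.Nodup) (h : d.get? k = some v) : d.insert k v = d := by
  apply PySem.Dict.ext
  rw [PySem.Dict.items_insert_of_contains d v (by rw [PySem.Dict.contains_eq_isSome_get?, h]; rfl)]
  conv_rhs => rw [← List.map_id d.items]
  apply List.map_congr_left
  intro p hp
  obtain ⟨p1, p2⟩ := p
  by_cases hpk : p1 = k
  · subst hpk
    have h2 : d.get? p1 = some p2 := PySem.Dict.get?_of_mem_items d hp hnd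
    rw [h] at h2
    simp [Option.some_inj.mp h2]
  · simp [hpk]

-- items of an update where every already-present key carries its current value
lemma pv_items_update_mixed (l : List (String × String)) (d : PySem.Dict String String)
    (hnd : d.keys.Nodup) (hl : (l.map Prod.fst).Nodup)
    (hpres : ∀ kv ∈ l, d.contains kv.1 = true → d.get? kv.1 = some kv.2) :
    (d.update l).items = d.items ++ l.filter (fun kv => !d.contains kv.1) := by
  induction l generalizing d with
  | nil => simp [PySem.Dict.update]
  | cons kv t ih =>
    simp only [List.map_cons, List.nodup_cons] at hl
    by_cases hc : d.contains kv.1 = true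
    · have heq : d.insert kv.1 kv.2 = d :=
        pv_insert_self hnd (hpres kv (List.mem_cons_self) hc)
      have := ih d hnd hl.2 (fun kv' h' => hpres kv' (List.mem_cons_of_mem _ h'))
      simpa [PySem.Dict.update, heq, hc] using this
    · have hcf : d.contains kv.1 = false := by simpa using hc
      have hins : (d.insert kv.1 kv.2).items = d.items ++ [(kv.1, kv.2)] :=
        PySem.Dict.items_insert_of_not_contains d kv.2 hcf
      have hnd' : (d.insert kv.1 kv.2).keys.Nodup := PySem.Dict.nodup_keys_insert d kv.1 kv.2 hnd
      have hpres' : ∀ kv' ∈ t, (d.insert kv.1 kv.2).contains kv'.1 = true →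
          (d.insert kv.1 kv.2).get? kv'.1 = some kv'.2 := by
        intro kv' h' hc'
        have hne : kv'.1 ≠ kv.1 := fun he => hl.1 (he ▸ List.mem_map_of_mem h')
        rw [PySem.Dict.get?_insert_of_ne _ _ hne]
        rw [PySem.Dict.contains_insert] at hc'
        have : d.contains kv'.1 = true := by
          cases hh : (kv'.1 == kv.1) with
          | true => exact absurd (by simpa using hh) hne
          | false => simpa [hh] using hc'
        exact hpres kv' (List.mem_cons_of_mem _ h') this
      have := ih (d.insert kv.1 kv.2) hnd' hl.2 hpres'
      have hfc : t.filter (fun kv' => !(d.insert kv.1 kv.2).contains kv'.1)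
          = t.filter (fun kv' => !d.contains kv'.1) := by
        apply List.filter_congr
        intro kv' h'
        have hne : kv'.1 ≠ kv.1 := fun he => hl.1 (he ▸ List.mem_map_of_mem h')
        rw [PySem.Dict.contains_insert]
        simp [hne]
      simp only [PySem.Dict.update, List.foldl_cons] at this ⊢
      rw [this, hfc, hins, List.filter_cons]
      simp [hcf]

-- proof-side repackagings of the two port bodies (definitionally equal to the ports applied to
-- req := lower change_request and L := (ofList all_files).items)
def pvA (req : String) (L : List (String × String)) : List (String × String) :=
  let relevant : PySem.Dict String String :=
    L.foldl (fun d kv => if pvAI kv.1 then d.insert kv.1 kv.2 else d) PySem.Dict.empty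
  let relevant :=
    L.foldl (fun rel kv =>
      if !(pvP kv.1) then rel
      else if PySem.Str.isIn (pvSectionName kv.1) req then rel.insert kv.1 kv.2 else rel) relevant
  let relevant :=
    if pvGlobalKeywords.any (fun kw => PySem.Str.isIn kw req) then
      relevant.update (L.filter (fun kv => pvP kv.1))
    else relevant
  let section_count := relevant.keys.foldl (fun n k => if pvP k then n + 1 else n) (0 : Int)
  let relevant := if section_count == 0 then relevant.update (L.filter (fun kv => pvP kv.1)) else relevant
  relevant.items

def pvB (req : String) (L : List (String × String)) : List (String × String) :=
  let decorated := L.map (fun kv => (pvRank req kv.1, kv.1, kv.2))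
  let wide := !(decorated.any (fun t => t.1 == 1)) || pvGlobalKeywords.any (fun kw => PySem.Str.isIn kw req)
  let cutoff : Int := if wide then 3 else 2
  let decorated := PySem.List.sorted decorated (fun t => t.1)
  (decorated.filter (fun t => t.1 < cutoff)).map (fun t => (t.2.1, t.2.2))

-- membership of a key in the keys of a filtered part of L
lemma pv_mem_map_filter {L : List (String × String)} {p : String × String → Bool} {k : String}
    (h : k ∈ (L.filter p).map Prod.fst) : ∃ kv ∈ L, p kv = true ∧ kv.1 = k := by
  obtain ⟨kv, hkv, hk⟩ := List.mem_map.mp h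
  exact ⟨kv, (List.mem_filter.mp hkv).1, (List.mem_filter.mp hkv).2, hk⟩

-- keys of two disjoint filtered parts are Nodup
lemma pv_nodup_filter2 {L : List (String × String)} (hnd : (L.map Prod.fst).Nodup)
    (p q : String × String → Bool) (hdisj : ∀ kv, p kv = true → q kv = true → False) :
    ((L.filter p ++ L.filter q).map Prod.fst).Nodup := by
  rw [List.map_append]
  refine List.Nodup.append (hnd.sublist ((L.filter_sublist).map Prod.fst))
    (hnd.sublist ((L.filter_sublist).map Prod.fst)) ?_
  intro k hk1 hk2
  obtain ⟨kv1, hm1, hp1, he1⟩ := pv_mem_map_filter hk1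
  obtain ⟨kv2, hm2, hp2, he2⟩ := pv_mem_map_filter hk2
  have : kv1 = kv2 := pv_pair_eq_of_nodup hnd hm1 hm2 (by rw [he1, he2])
  exact hdisj kv1 hp1 (this ▸ hp2)

-- and three parts
lemma pv_nodup_filter3 {L : List (String × String)} (hnd : (L.map Prod.fst).Nodup)
    (p q r : String × String → Bool)
    (hpq : ∀ kv, p kv = true → q kv = true → False)
    (hpr : ∀ kv, p kv = true → r kv = true → False)
    (hqr : ∀ kv, q kv = true → r kv = true → False) :
    ((L.filter p ++ L.filter q ++ L.filter r).map Prod.fst).Nodup := by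
  rw [List.map_append]
  refine List.Nodup.append (pv_nodup_filter2 hnd p q hpq)
    (hnd.sublist ((L.filter_sublist).map Prod.fst)) ?_
  intro k hk1 hk3
  obtain ⟨kv3, hm3, hp3, he3⟩ := pv_mem_map_filter hk3
  rw [List.map_append] at hk1
  rcases List.mem_append.mp hk1 with hk1 | hk1 <;>
    obtain ⟨kv1, hm1, hp1, he1⟩ := pv_mem_map_filter hk1
  · exact hpr kv1 hp1 ((pv_pair_eq_of_nodup hnd hm1 hm3 (by rw [he1, he3])) ▸ hp3)
  · exact hqr kv1 hp1 ((pv_pair_eq_of_nodup hnd hm1 hm3 (by rw [he1, he3])) ▸ hp3)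

lemma pv_AI_M_disj (req : String) : ∀ kv : String × String, pvAI kv.1 = true → pvM req kv = true → False := by
  intro kv hAI hM
  have := pvAI_not_P hAI
  simp [pvM, this] at hM

-- stage 0+1: the always-seed plus the matched-section inserts, as an items list
lemma pv_items1 (req : String) (L : List (String × String)) (hnd : (L.map Prod.fst).Nodup) :
    (L.foldl (fun rel kv =>
        if !(pvP kv.1) then rel
        else if PySem.Str.isIn (pvSectionName kv.1) req then rel.insert kv.1 kv.2 else rel)
      (L.foldl (fun d kv => if pvAI kv.1 then d.insert kv.1 kv.2 else d) PySem.Dict.empty)).items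
    = L.filter (fun kv => pvAI kv.1) ++ L.filter (pvM req) := by
  have hbody : (fun (rel : PySem.Dict String String) (kv : String × String) =>
      if !(pvP kv.1) then rel
      else if PySem.Str.isIn (pvSectionName kv.1) req then rel.insert kv.1 kv.2 else rel)
      = (fun rel kv => if pvM req kv then rel.insert kv.1 kv.2 else rel) := by
    funext rel kv
    cases hp : pvP kv.1 <;> simp [pvM, hp]
  rw [hbody, PySem.List.foldl_if_eq_foldl_filter, PySem.List.foldl_if_eq_foldl_filter]
  have hd0 : ((L.filter (fun kv => pvAI kv.1)).foldl
      (fun (d : PySem.Dict String String) kv => d.insert kv.1 kv.2) PySem.Dict.empty).items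
      = L.filter (fun kv => pvAI kv.1) := by
    rw [PySem.Dict.items_foldl_insert_fresh _ Prod.fst Prod.snd _
      (fun a _ => PySem.Dict.contains_empty a.1)
      (hnd.sublist ((L.filter_sublist).map Prod.fst))]
    simp [PySem.Dict.empty]
  have hfresh : ∀ a ∈ L.filter (pvM req),
      (((L.filter (fun kv => pvAI kv.1)).foldl
        (fun (d : PySem.Dict String String) kv => d.insert kv.1 kv.2) PySem.Dict.empty)).contains a.1 = false := by
    intro a ha
    have haL := List.mem_filter.mp ha
    have hP : pvP a.1 = true := by
      have h2 := haL.2; simp only [pvM, Bool.and_eq_true] at h2; exact h2.1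
    by_contra hcon
    have hc : (((L.filter (fun kv => pvAI kv.1)).foldl
        (fun (d : PySem.Dict String String) kv => d.insert kv.1 kv.2) PySem.Dict.empty)).contains a.1 = true := by
      revert hcon; cases h : (((L.filter (fun kv => pvAI kv.1)).foldl
        (fun (d : PySem.Dict String String) kv => d.insert kv.1 kv.2) PySem.Dict.empty)).contains a.1 <;> simp
    have hmem := (PySem.Dict.contains_iff_mem_keys _ _).1 hc
    simp only [PySem.Dict.keys, hd0] at hmem
    obtain ⟨kv, _, hAI, he⟩ := pv_mem_map_filter hmem
    rw [he] at hAI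
    rw [pvAI_not_P hAI] at hP
    exact Bool.false_ne_true hP
  rw [PySem.Dict.items_foldl_insert_fresh _ Prod.fst Prod.snd _
    hfresh (hnd.sublist ((L.filter_sublist).map Prod.fst))]
  rw [hd0]
  simp

-- key containment in the stage-1 dict, for a section path
lemma pv_contains1 {req : String} {L : List (String × String)} (hnd : (L.map Prod.fst).Nodup)
    {d : PySem.Dict String String}
    (hit : d.items = L.filter (fun kv => pvAI kv.1) ++ L.filter (pvM req))
    {kv : String × String} (hkv : kv ∈ L) (hp : pvP kv.1 = true) :
    d.contains kv.1 = pvM req kv := by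
  cases hm : pvM req kv with
  | true =>
    refine (PySem.Dict.contains_iff_mem_keys _ _).2 ?_
    simp only [PySem.Dict.keys, hit, List.map_append]
    exact List.mem_append.mpr (Or.inr (List.mem_map_of_mem (List.mem_filter.mpr ⟨hkv, hm⟩)))
  | false =>
    by_contra hcon
    have hc : d.contains kv.1 = true := by revert hcon; cases d.contains kv.1 <;> simp
    have hmem := (PySem.Dict.contains_iff_mem_keys _ _).1 hc
    simp only [PySem.Dict.keys, hit, List.map_append] at hmem
    rcases List.mem_append.mp hmem with h | h <;> obtain ⟨kv', hm', hp', he'⟩ := pv_mem_map_filter h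
    · have : kv' = kv := pv_pair_eq_of_nodup hnd hm' hkv he'
      rw [this] at hp'
      rw [pvAI_not_P hp'] at hp
      exact Bool.false_ne_true hp
    · have : kv' = kv := pv_pair_eq_of_nodup hnd hm' hkv he'
      rw [this, hm] at hp'
      exact Bool.false_ne_true hp'

-- every pair of the stage-1 items carries its own value under get?
lemma pv_get?_of_mem {d : PySem.Dict String String} (hknd : d.keys.Nodup)
    {kv : String × String} (h : kv ∈ d.items) : d.get? kv.1 = some kv.2 :=
  PySem.Dict.get?_of_mem_items d (by simpa using h) hknd

-- the global-keyword / backfill update of the stage-1 dict, as an items list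
lemma pv_update1 (req : String) (L : List (String × String)) (hnd : (L.map Prod.fst).Nodup)
    (d : PySem.Dict String String)
    (hit : d.items = L.filter (fun kv => pvAI kv.1) ++ L.filter (pvM req))
    (hknd : d.keys.Nodup) :
    (d.update (L.filter (fun kv => pvP kv.1))).items
    = (L.filter (fun kv => pvAI kv.1) ++ L.filter (pvM req))
      ++ L.filter (fun kv => pvP kv.1 && !(PySem.Str.isIn (pvSectionName kv.1) req)) := by
  rw [pv_items_update_mixed _ _ hknd (hnd.sublist ((L.filter_sublist).map Prod.fst)) ?pres]
  case pres =>
    intro kv hkv hc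
    have hkvL := (List.mem_filter.mp hkv).1
    have hp := (List.mem_filter.mp hkv).2
    rw [pv_contains1 hnd hit hkvL hp] at hc
    exact pv_get?_of_mem hknd (hit ▸ List.mem_append.mpr (Or.inr (List.mem_filter.mpr ⟨hkvL, hc⟩)))
  rw [hit, List.filter_filter]
  congr 1
  apply List.filter_congr
  intro kv hkv
  cases hp : pvP kv.1 with
  | false => simp only [Bool.and_false, Bool.false_and, hp]
  | true =>
    rw [pv_contains1 hnd hit hkv hp]
    cases hi : PySem.Str.isIn (pvSectionName kv.1) req <;>
      simp only [pvM, hp, hi] <;> rfl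

-- key-set Nodup for the three-part items list
lemma pv_nodup_keys2 (req : String) (L : List (String × String)) (hnd : (L.map Prod.fst).Nodup) :
    (((L.filter (fun kv => pvAI kv.1) ++ L.filter (pvM req))
      ++ L.filter (fun kv => pvP kv.1 && !(PySem.Str.isIn (pvSectionName kv.1) req))).map Prod.fst).Nodup := by
  refine pv_nodup_filter3 hnd _ _ _ (pv_AI_M_disj req) ?_ ?_
  · intro kv hAI hE
    simp only [Bool.and_eq_true] at hE
    rw [pvAI_not_P hAI] at hE
    exact Bool.false_ne_true hE.1
  · intro kv hM hE
    simp only [pvM, Bool.and_eq_true] at hM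
    simp only [Bool.and_eq_true, Bool.not_eq_true'] at hE
    rw [hM.2] at hE
    exact Bool.noConfusion hE.2

-- after the backfill every section file is present with its own value: a second update is a no-op
lemma pv_update2_noop (req : String) (L : List (String × String)) (hnd : (L.map Prod.fst).Nodup)
    (d : PySem.Dict String String)
    (hit : d.items = (L.filter (fun kv => pvAI kv.1) ++ L.filter (pvM req))
      ++ L.filter (fun kv => pvP kv.1 && !(PySem.Str.isIn (pvSectionName kv.1) req)))
    (hknd : d.keys.Nodup) :
    d.update (L.filter (fun kv => pvP kv.1)) = d := by
  have hmem : ∀ kv ∈ L.filter (fun kv => pvP kv.1), kv ∈ d.items := by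
    intro kv hkv
    have hkvL := (List.mem_filter.mp hkv).1
    have hp := (List.mem_filter.mp hkv).2
    rw [hit]
    cases hi : PySem.Str.isIn (pvSectionName kv.1) req with
    | true =>
      exact List.mem_append.mpr (Or.inl (List.mem_append.mpr (Or.inr
        (List.mem_filter.mpr ⟨hkvL, by simp only [pvM, hp, hi]; rfl⟩))))
    | false =>
      exact List.mem_append.mpr (Or.inr (List.mem_filter.mpr ⟨hkvL, by simp only [hp, hi]; rfl⟩))
  apply PySem.Dict.ext
  rw [pv_items_update_mixed _ _ hknd (hnd.sublist ((L.filter_sublist).map Prod.fst))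
    (fun kv hkv _ => pv_get?_of_mem hknd (hmem kv hkv))]
  have : (L.filter (fun kv => pvP kv.1)).filter (fun kv => !d.contains kv.1) = [] := by
    rw [List.filter_eq_nil_iff]
    intro kv hkv
    have hc : d.contains kv.1 = true :=
      (PySem.Dict.contains_iff_mem_keys _ _).2 (List.mem_map_of_mem (hmem kv hkv))
    simp [hc]
  rw [this, List.append_nil]

-- the no-match backfill over the always-only dict appends every section file
lemma pv_update_empty (req : String) (L : List (String × String)) (hnd : (L.map Prod.fst).Nodup)
    (d : PySem.Dict String String)
    (hit : d.items = L.filter (fun kv => pvAI kv.1) ++ L.filter (pvM req))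
    (hknd : d.keys.Nodup) (hM : L.filter (pvM req) = []) :
    (d.update (L.filter (fun kv => pvP kv.1))).items
    = (L.filter (fun kv => pvAI kv.1) ++ L.filter (pvM req)) ++ L.filter (fun kv => pvP kv.1) := by
  have hcontains : ∀ kv ∈ L.filter (fun kv => pvP kv.1), d.contains kv.1 = false := by
    intro kv hkv
    have hkvL := (List.mem_filter.mp hkv).1
    have hp := (List.mem_filter.mp hkv).2
    rw [pv_contains1 hnd hit hkvL hp]
    cases hm : pvM req kv with
    | true =>
      have : kv ∈ L.filter (pvM req) := List.mem_filter.mpr ⟨hkvL, hm⟩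
      rw [hM] at this
      cases this
    | false => rfl
  rw [pv_items_update_mixed _ _ hknd (hnd.sublist ((L.filter_sublist).map Prod.fst)) ?pres]
  case pres =>
    intro kv hkv hc
    rw [hcontains kv hkv] at hc
    cases hc
  have hfix : (L.filter (fun kv => pvP kv.1)).filter (fun kv => !d.contains kv.1)
      = L.filter (fun kv => pvP kv.1) :=
    List.filter_eq_self.mpr (fun kv hkv => by rw [hcontains kv hkv]; rfl)
  rw [hit, hfix]

-- ===== B-side lemmas: the stable sort by a {0,1,2,3}-valued key is bucket concatenation =====

lemma pv_insertBy_cons_not_before {α : Type} (before : α → α → Bool) (x a : α) (ys : List α)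
    (ha : before x a = false) :
    PySem.List.insertBy before x (a :: ys) = a :: PySem.List.insertBy before x ys := by
  cases ys <;> simp [PySem.List.insertBy, ha]

lemma pv_insertBy_skip {α : Type} (before : α → α → Bool) (x : α) (as bs : List α)
    (h : ∀ y ∈ as, before x y = false) :
    PySem.List.insertBy before x (as ++ bs) = as ++ PySem.List.insertBy before x bs := by
  induction as with
  | nil => simp
  | cons a t ih =>
    rw [List.cons_append, pv_insertBy_cons_not_before _ _ _ _ (h a (List.mem_cons_self)),
      ih (fun y hy => h y (List.mem_cons_of_mem _ hy))]
    rfl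

lemma pv_insertBy_head {α : Type} (before : α → α → Bool) (x : α) (zs : List α)
    (h : ∀ y ∈ zs, before x y = true) :
    PySem.List.insertBy before x zs = x :: zs := by
  cases zs with
  | nil => rfl
  | cons z t => simp [PySem.List.insertBy, h z (List.mem_cons_self)]

-- stable sort by an Int key taking only the values 0,1,2,3: the four buckets in input order
lemma pv_sorted_buckets {α : Type} (key : α → Int) (L : List α)
    (h : ∀ x ∈ L, key x = 0 ∨ key x = 1 ∨ key x = 2 ∨ key x = 3) :
    PySem.List.sorted L key
      = L.filter (fun x => key x == 0) ++ L.filter (fun x => key x == 1)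
        ++ L.filter (fun x => key x == 2) ++ L.filter (fun x => key x == 3) := by
  rw [PySem.List.sorted_eq_foldl_insertBy]
  induction L using List.reverseRecOn with
  | nil => rfl
  | append_singleton M x ih =>
    rw [List.foldl_append, List.foldl_cons, List.foldl_nil,
      ih (fun y hy => h y (List.mem_append.mpr (Or.inl hy)))]
    have hkey : ∀ (i : Int) (p : α → Bool), (∀ y, p y = true → key y = i) →
        ∀ y ∈ M.filter p, key y = i := by
      intro i p hp y hy
      exact hp y (List.mem_filter.mp hy).2
    have hb0 : ∀ y ∈ M.filter (fun z => key z == 0), key y = 0 :=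
      hkey 0 _ (fun y hy => by simpa using hy)
    have hb1 : ∀ y ∈ M.filter (fun z => key z == 1), key y = 1 :=
      hkey 1 _ (fun y hy => by simpa using hy)
    have hb2 : ∀ y ∈ M.filter (fun z => key z == 2), key y = 2 :=
      hkey 2 _ (fun y hy => by simpa using hy)
    have hb3 : ∀ y ∈ M.filter (fun z => key z == 3), key y = 3 :=
      hkey 3 _ (fun y hy => by simpa using hy)
    have hfilt : ∀ (i : Int), (M ++ [x]).filter (fun z => key z == i)
        = M.filter (fun z => key z == i) ++ (if key x == i then [x] else []) := by
      intro i; simp [List.filter_append, List.filter_singleton, Bool.cond_eq_ite]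
    have hassoc : M.filter (fun z => key z == 0) ++ M.filter (fun z => key z == 1)
          ++ M.filter (fun z => key z == 2) ++ M.filter (fun z => key z == 3)
        = M.filter (fun z => key z == 0) ++ (M.filter (fun z => key z == 1)
          ++ (M.filter (fun z => key z == 2) ++ M.filter (fun z => key z == 3))) := by simp
    rcases h x (List.mem_append.mpr (Or.inr (List.mem_singleton.mpr rfl))) with hx | hx | hx | hx
    · -- key x = 0 : stable, so x lands at the END of bucket 0
      rw [hassoc, pv_insertBy_skip _ _ _ _ (fun y hy => by simp [hb0 y hy, hx]),
        pv_insertBy_head _ _ _ ?hall]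
      case hall =>
        intro y hy
        rcases List.mem_append.mp hy with hy | hy
        · simp [hb1 y hy, hx]
        · rcases List.mem_append.mp hy with hy | hy
          · simp [hb2 y hy, hx]
          · simp [hb3 y hy, hx]
      rw [hfilt 0, hfilt 1, hfilt 2, hfilt 3]
      simp [hx]
    · -- key x = 1 : skip bucket 0 and bucket 1, head of the rest
      rw [hassoc, pv_insertBy_skip _ _ _ _ (fun y hy => by simp [hb0 y hy, hx]),
        pv_insertBy_skip _ _ _ _ (fun y hy => by simp [hb1 y hy, hx]),
        pv_insertBy_head _ _ _ ?hall]
      case hall =>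
        intro y hy
        rcases List.mem_append.mp hy with hy | hy
        · simp [hb2 y hy, hx]
        · simp [hb3 y hy, hx]
      rw [hfilt 0, hfilt 1, hfilt 2, hfilt 3]
      simp [hx]
    · -- key x = 2 : skip buckets 0, 1, 2, head of bucket 3
      rw [hassoc, pv_insertBy_skip _ _ _ _ (fun y hy => by simp [hb0 y hy, hx]),
        pv_insertBy_skip _ _ _ _ (fun y hy => by simp [hb1 y hy, hx]),
        pv_insertBy_skip _ _ _ _ (fun y hy => by simp [hb2 y hy, hx]),
        pv_insertBy_head _ _ _ (fun y hy => by simp [hb3 y hy, hx])]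
      rw [hfilt 0, hfilt 1, hfilt 2, hfilt 3]
      simp [hx]
    · -- key x = 3 : lands at the very end
      rw [hassoc, pv_insertBy_skip _ _ _ _ (fun y hy => by simp [hb0 y hy, hx]),
        pv_insertBy_skip _ _ _ _ (fun y hy => by simp [hb1 y hy, hx]),
        pv_insertBy_skip _ _ _ _ (fun y hy => by simp [hb2 y hy, hx]),
        PySem.List.insertBy_of_forall_not_before _ _ _ (fun y hy => by simp [hb3 y hy, hx])]
      rw [hfilt 0, hfilt 1, hfilt 2, hfilt 3]
      simp [hx]

-- rank takes only the values 0,1,2,3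
lemma pv_rank_cases (req k : String) :
    pvRank req k = 0 ∨ pvRank req k = 1 ∨ pvRank req k = 2 ∨ pvRank req k = 3 := by
  rw [pvRank_eq]; split_ifs <;> simp

-- the rank buckets, pulled back through the decoration map, are A's filters
lemma pv_rank_bucket0 (req : String) (kv : String × String) :
    (pvRank req kv.1 == 0) = pvAI kv.1 := by
  rw [pvRank_eq]; split_ifs with h0 h1 h2 <;> simp_all

lemma pv_rank_bucket1 (req : String) (kv : String × String) :
    (pvRank req kv.1 == 1) = pvM req kv := by
  rw [pvRank_eq]; split_ifs with h0 h1 h2 <;> simp_all [pvM, pvAI_not_P]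

lemma pv_rank_bucket2 (req : String) (kv : String × String) :
    (pvRank req kv.1 == 2) = (pvP kv.1 && !(PySem.Str.isIn (pvSectionName kv.1) req)) := by
  rw [pvRank_eq]; split_ifs with h0 h1 h2 <;> simp_all [pvAI_not_P]

-- pvB as the three leading buckets, with or without the third, depending on the wide flag
lemma pv_B_eval (req : String) (L : List (String × String)) :
    pvB req L
      = if (!(L.any (pvM req)) || pvGlobalKeywords.any (fun kw => PySem.Str.isIn kw req)) then
          L.filter (fun kv => pvAI kv.1) ++ L.filter (pvM req)
            ++ L.filter (fun kv => pvP kv.1 && !(PySem.Str.isIn (pvSectionName kv.1) req))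
        else
          L.filter (fun kv => pvAI kv.1) ++ L.filter (pvM req) := by
  have hsort := pv_sorted_buckets (fun t : Int × String × String => t.1)
    (L.map (fun kv => (pvRank req kv.1, kv.1, kv.2)))
    (by
      intro t ht
      obtain ⟨kv, _, rfl⟩ := List.mem_map.mp ht
      exact pv_rank_cases req kv.1)
  have hany : (L.map (fun kv => (pvRank req kv.1, kv.1, kv.2))).any
      (fun t => t.1 == 1) = L.any (pvM req) := by
    rw [List.any_map]
    simp only [Function.comp_def]
    congr 1
    funext kv
    exact pv_rank_bucket1 req kv
  -- each decorated bucket, filtered by the cutoff, mapped back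
  have hbucket : ∀ (i : Int) (c : Int),
      (((L.map (fun kv => (pvRank req kv.1, kv.1, kv.2))).filter
          (fun t => t.1 == i)).filter (fun t => t.1 < c)).map (fun t => (t.2.1, t.2.2))
      = if i < c then L.filter (fun kv => pvRank req kv.1 == i) else [] := by
    intro i c
    rw [List.filter_filter, List.filter_map]
    simp only [Function.comp_def]
    have hcong : L.filter (fun kv => decide (pvRank req kv.1 < c) && (pvRank req kv.1 == i))
        = if i < c then L.filter (fun kv => pvRank req kv.1 == i) else [] := by
      by_cases hic : i < c
      · rw [if_pos hic]
        apply List.filter_congr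
        intro kv _
        by_cases hr : pvRank req kv.1 = i
        · simp [hr, hic]
        · simp [beq_eq_false_iff_ne.mpr hr]
      · rw [if_neg hic]
        rw [List.filter_eq_nil_iff]
        intro kv _
        by_cases hr : pvRank req kv.1 = i
        · simp [hr, hic]
        · simp [beq_eq_false_iff_ne.mpr hr]
    rw [hcong]
    by_cases hic : i < c
    · rw [if_pos hic, List.map_map,
        show ((fun t : Int × String × String => (t.2.1, t.2.2))
            ∘ fun kv : String × String => (pvRank req kv.1, kv.1, kv.2)) = id from funext fun kv => rfl,
        List.map_id]
    · simp [hic]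
  have hB : pvB req L = ((((L.map (fun kv => (pvRank req kv.1, kv.1, kv.2))).filter
        (fun t => t.1 == 0) ++ (L.map (fun kv => (pvRank req kv.1, kv.1, kv.2))).filter
        (fun t => t.1 == 1) ++ (L.map (fun kv => (pvRank req kv.1, kv.1, kv.2))).filter
        (fun t => t.1 == 2) ++ (L.map (fun kv => (pvRank req kv.1, kv.1, kv.2))).filter
        (fun t => t.1 == 3)).filter
          (fun t => t.1 < (if (!(L.any (pvM req)) || pvGlobalKeywords.any (fun kw => PySem.Str.isIn kw req)) then (3:Int) else 2))).map
            (fun t => (t.2.1, t.2.2))) := by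
    simp only [pvB, hsort, hany]
  rw [hB]
  simp only [List.filter_append, List.map_append]
  rw [hbucket 0 _, hbucket 1 _, hbucket 2 _, hbucket 3 _]
  have e0 : L.filter (fun kv => pvRank req kv.1 == 0) = L.filter (fun kv => pvAI kv.1) :=
    List.filter_congr (fun kv _ => pv_rank_bucket0 req kv)
  have e1 : L.filter (fun kv => pvRank req kv.1 == 1) = L.filter (pvM req) :=
    List.filter_congr (fun kv _ => pv_rank_bucket1 req kv)
  have e2 : L.filter (fun kv => pvRank req kv.1 == 2)
      = L.filter (fun kv => pvP kv.1 && !(PySem.Str.isIn (pvSectionName kv.1) req)) :=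
    List.filter_congr (fun kv _ => pv_rank_bucket2 req kv)
  by_cases hw : (!(L.any (pvM req)) || pvGlobalKeywords.any (fun kw => PySem.Str.isIn kw req)) = true
  · simp only [hw, if_pos]
    norm_num [e0, e1, e2]
  · have hw' := Bool.eq_false_iff.mpr hw
    simp only [hw']
    norm_num [e0, e1, e2]

-- the main list-level equivalence, for any list with Nodup keys
lemma pv_main (req : String) (L : List (String × String)) (hnd : (L.map Prod.fst).Nodup) :
    pvA req L = pvB req L := by
  have hit1 := pv_items1 req L hnd
  have hknd1 : ((L.foldl (fun rel kv =>
        if !(pvP kv.1) then rel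
        else if PySem.Str.isIn (pvSectionName kv.1) req then rel.insert kv.1 kv.2 else rel)
      (L.foldl (fun d kv => if pvAI kv.1 then d.insert kv.1 kv.2 else d) PySem.Dict.empty))).keys.Nodup := by
    simp only [PySem.Dict.keys, hit1]
    exact pv_nodup_filter2 hnd _ _ (pv_AI_M_disj req)
  rw [pv_B_eval]
  have hanyM : L.any (pvM req) = !(L.filter (pvM req)).isEmpty := by
    cases hM : L.any (pvM req) with
    | true =>
      obtain ⟨kv, hkv, hm⟩ := List.any_eq_true.mp hM
      have : kv ∈ L.filter (pvM req) := List.mem_filter.mpr ⟨hkv, hm⟩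
      cases hE : (L.filter (pvM req)).isEmpty with
      | true => rw [List.isEmpty_iff.mp hE] at this; cases this
      | false => rfl
    | false =>
      have : L.filter (pvM req) = [] := by
        rw [List.filter_eq_nil_iff]
        intro kv hkv
        have := List.any_eq_false.mp hM kv hkv
        simpa using this
      simp [this]
  by_cases hg : pvGlobalKeywords.any (fun kw => PySem.Str.isIn kw req) = true
  · -- a global keyword occurs: both programs include every section file
    have hit2 := pv_update1 req L hnd _ hit1 hknd1
    have hknd2 : ((L.foldl (fun rel kv =>
          if !(pvP kv.1) then rel
          else if PySem.Str.isIn (pvSectionName kv.1) req then rel.insert kv.1 kv.2 else rel)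
        (L.foldl (fun d kv => if pvAI kv.1 then d.insert kv.1 kv.2 else d) PySem.Dict.empty)).update
          (L.filter (fun kv => pvP kv.1))).keys.Nodup := by
      simp only [PySem.Dict.keys, hit2]
      exact pv_nodup_keys2 req L hnd
    have hnoop := pv_update2_noop req L hnd _ hit2 hknd2
    simp only [pvA, hg, Bool.or_true, if_true, hnoop, ite_self, hit2]
  · -- no global keyword
    have hgf : pvGlobalKeywords.any (fun kw => PySem.Str.isIn kw req) = false :=
      Bool.eq_false_iff.mpr hg
    have h1 : List.countP (fun k => pvP k) ((L.filter (fun kv => pvAI kv.1)).map (fun x => x.1)) = 0 := by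
      rw [List.countP_map, List.countP_eq_zero]
      intro kv hkv
      simp [Function.comp, pvAI_not_P (List.mem_filter.mp hkv).2]
    have h2 : List.countP (fun k => pvP k) ((L.filter (pvM req)).map (fun x => x.1))
        = (L.filter (pvM req)).length := by
      rw [List.countP_map, List.countP_eq_length]
      intro kv hkv
      have hh := (List.mem_filter.mp hkv).2
      simp only [pvM, Bool.and_eq_true] at hh
      simpa [Function.comp] using hh.1
    simp only [pvA, hgf, Bool.or_false, if_false, Bool.false_eq_true]
    simp only [PySem.Dict.keys, hit1, List.map_append]
    rw [PySem.List.foldl_if_add_one, List.countP_append, h1, h2, Nat.zero_add, zero_add]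
    by_cases hM : L.filter (pvM req) = []
    · -- nothing matched: both programs backfill every section file
      have hup := pv_update_empty req L hnd _ hit1 hknd1 hM
      rw [apply_ite PySem.Dict.items, hup, hM]
      have hEmpty : (L.filter (pvM req)).isEmpty = true := by simp [hM]
      have hfix : L.filter (fun kv => pvP kv.1 && !(PySem.Str.isIn (pvSectionName kv.1) req))
          = L.filter (fun kv => pvP kv.1) := by
        apply List.filter_congr
        intro kv hkv
        cases hp : pvP kv.1 with
        | false => rfl
        | true =>
          have hi : PySem.Str.isIn (pvSectionName kv.1) req = false := by
            by_contra hc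
            have hi' : PySem.Str.isIn (pvSectionName kv.1) req = true := by
              revert hc; cases PySem.Str.isIn (pvSectionName kv.1) req <;> simp
            have : kv ∈ L.filter (pvM req) :=
              List.mem_filter.mpr ⟨hkv, by simp only [pvM]; rw [hp, hi']; rfl⟩
            rw [hM] at this; cases this
          rw [hi]; rfl
      rw [hanyM, hEmpty, hfix]
      simp [hM]
    · -- some section matched: no backfill on either side
      have hlen : (L.filter (pvM req)).length ≠ 0 := by
        simpa [List.length_eq_zero_iff] using hM
      have hc : ((((L.filter (pvM req)).length : Nat) : Int) == 0) = false :=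
        beq_eq_false_iff_ne.mpr (Int.natCast_ne_zero.mpr hlen)
      rw [hc]
      simp only [Bool.false_eq_true, if_false, hit1]
      have hne : (L.filter (pvM req)).isEmpty = false := by
        simpa [List.isEmpty_iff] using hM
      rw [hanyM, hne]
      simp

-- ===== VERDICT (by name: the statement is the Claim_ definition above) =====
theorem get_relevant_files_py_spec : Claim_equal_get_relevant_files_py := by
  intro change_request all_files _
  show get_relevant_files_py change_request all_files = get_relevant_files_py_alt change_request all_files
  have hnd : (((PySem.Dict.ofList all_files).items).map Prod.fst).Nodup := by
    simpa [PySem.Dict.keys] using PySem.Dict.nodup_keys_ofList all_files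
  exact pv_main (PySem.Str.lower change_request) ((PySem.Dict.ofList all_files).items) hnd
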